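-- pv_equiv track=rewrite | github.com/naemlucifer/KrunchWrapper | server/logging_utils.py | _extract_debug_category_from_message
-- ===== SOURCE A (Python) =====
-- def _extract_debug_category_from_message(message: str) -> str:
--     """
--     Extract debug category from message content based on common patterns.
--
--     Returns the appropriate debug category name for the message content.
--     """
--     # Convert to uppercase for consistent matching
--     msg_upper = message.upper()
--
--     # Check most specific patterns first to avoid mismatches
--
--     # System Operations & Infrastructure - check specific tags first
--     if "[FIX]" in msg_upper:
--         return "system_fixes"
--     if "[TIMEOUT FILTER]" in msg_upper:
--         return "request_filtering"
--     if "[CLEANUP]" in msg_upper: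
--         return "cleanup_operations"
--     if "[ERROR]" in msg_upper:
--         return "error_handling"
--
--     # Request Processing & Client Detection
--     if "[ALL REQUESTS]" in msg_upper or "[DEBUG]" in msg_upper:
--         return "request_processing"
--     if "[CLINE]" in msg_upper:
--         return "cline_integration"
--     if "[SESSION]" in msg_upper:
--         return "session_management"
--
--     # Response Processing & Decompression - check specific patterns first
--     if any(term in msg_upper for term in ["[STREAMING DEBUG]", "[PROXY STREAMING DEBUG]"]):
--         return "streaming_responses"
--     if any(term in msg_upper for term in ["[NON-STREAMING DEBUG]", "[PROXY DECOMPRESSION DEBUG]"]):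
--         return "response_decompression"
--     if "TOKEN CALCULATION" in msg_upper:
--         return "token_calculations"
--
--     # Compression Operations & Analysis - check specific patterns first
--     if "[CONVERSATION DETECTION]" in msg_upper:
--         return "conversation_detection"
--     if any(term in msg_upper for term in ["[KV DEBUG]", "[KV CACHE]"]):
--         return "kv_cache_optimization"
--     if "[CONVERSATION COMPRESS]" in msg_upper:
--         return "conversation_compression"
--     if "[PROXY]" in msg_upper:
--         return "compression_proxy"
--
--     # Server Communication & Forwarding - check model context first
--     if "SET MODEL CONTEXT" in msg_upper:
--         return "model_context"
--     if any(term in msg_upper for term in ["SERVER", "FORWARDED", "TARGET", "API"]):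
--         return "server_communication"
--
--     # Development & Testing
--     if "[PAYLOAD DEBUG]" in msg_upper:
--         return "payload_debugging"
--     if any(term in msg_upper for term in ["TEST", "DEMO", "EXPERIMENT"]):
--         return "test_utilities"
--
--     # More general patterns (checked after specific ones)
--     if any(term in msg_upper for term in ["OVERRIDE", "TIMEOUT"]):
--         return "system_fixes"  # Timeout overrides are system fixes
--     if any(term in msg_upper for term in ["COMPRESSION", "DYNAMIC DICTIONARY", "ANALYSIS"]):
--         return "compression_core"
--     if any(term in msg_upper for term in ["SYMBOL", "MODEL CONTEXT"]):
--         return "symbol_management"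
--
--     # Default to request_processing for unmatched debug messages
--     return "request_processing"
-- ===== SOURCE B (Python) =====
-- # Different algorithm: instead of an ordered if-chain of whole-string substring tests,
-- # B runs a naive multi-pattern text scan: one pass over the positions of the upcased
-- # message, testing which patterns start at each position, and keeps the smallest
-- # priority seen; the category is looked up by that priority at the end.
-- _CATEGORIES = [
--     "system_fixes", "request_filtering", "cleanup_operations", "error_handling",
--     "request_processing", "cline_integration", "session_management",
--     "streaming_responses", "response_decompression", "token_calculations",
--     "conversation_detection", "kv_cache_optimization", "conversation_compression",
--     "compression_proxy", "model_context", "server_communication",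
--     "payload_debugging", "test_utilities", "system_fixes", "compression_core",
--     "symbol_management", "request_processing",
-- ]
--
-- _PATTERNS = [
--     ("[FIX]", 0),
--     ("[TIMEOUT FILTER]", 1),
--     ("[CLEANUP]", 2),
--     ("[ERROR]", 3),
--     ("[ALL REQUESTS]", 4), ("[DEBUG]", 4),
--     ("[CLINE]", 5),
--     ("[SESSION]", 6),
--     ("[STREAMING DEBUG]", 7), ("[PROXY STREAMING DEBUG]", 7),
--     ("[NON-STREAMING DEBUG]", 8), ("[PROXY DECOMPRESSION DEBUG]", 8),
--     ("TOKEN CALCULATION", 9),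
--     ("[CONVERSATION DETECTION]", 10),
--     ("[KV DEBUG]", 11), ("[KV CACHE]", 11),
--     ("[CONVERSATION COMPRESS]", 12),
--     ("[PROXY]", 13),
--     ("SET MODEL CONTEXT", 14),
--     ("SERVER", 15), ("FORWARDED", 15), ("TARGET", 15), ("API", 15),
--     ("[PAYLOAD DEBUG]", 16),
--     ("TEST", 17), ("DEMO", 17), ("EXPERIMENT", 17),
--     ("OVERRIDE", 18), ("TIMEOUT", 18),
--     ("COMPRESSION", 19), ("DYNAMIC DICTIONARY", 19), ("ANALYSIS", 19),
--     ("SYMBOL", 20), ("MODEL CONTEXT", 20),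
-- ]
--
-- def _extract_debug_category_from_message(message: str) -> str:
--     u = message.upper()
--     best = len(_CATEGORIES) - 1  # default priority
--     for i in range(len(u)):
--         for p, pr in _PATTERNS:
--             if pr < best and u.startswith(p, i):
--                 best = pr
--     return _CATEGORIES[best]
-- ===== Notes on version B (the rewrite author's own statement) =====
-- stated objective: alternative
-- what changed: Replaces A's ordered if-chain of whole-string substring tests with a naive multi-pattern text scan: one pass over the positions of the upcased message testing which patterns start at each position, keeping the minimum priority, then a table lookup of the category.
import Mathlib
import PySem

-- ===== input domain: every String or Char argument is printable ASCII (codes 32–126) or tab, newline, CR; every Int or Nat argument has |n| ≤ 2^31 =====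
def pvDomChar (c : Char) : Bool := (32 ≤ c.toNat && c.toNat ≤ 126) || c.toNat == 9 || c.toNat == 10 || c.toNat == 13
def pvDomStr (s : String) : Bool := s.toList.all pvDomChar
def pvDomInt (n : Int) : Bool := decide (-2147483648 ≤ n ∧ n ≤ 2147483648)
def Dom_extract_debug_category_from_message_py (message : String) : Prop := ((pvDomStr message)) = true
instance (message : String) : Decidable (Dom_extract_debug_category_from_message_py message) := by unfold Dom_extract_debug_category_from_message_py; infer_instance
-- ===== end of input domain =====

-- B replaces A's ordered if-chain of whole-string substring tests by a naive multi-pattern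
-- text scan (one pass over the positions of the upcased message, keeping the minimum
-- matching priority, then a table lookup); objective: alternative algorithm, same cost class.

-- ===== PORT A =====
def extract_debug_category_from_message_py (message : String) : String :=
  let msg_upper := PySem.Str.upper message
  if PySem.Str.isIn "[FIX]" msg_upper then "system_fixes"
  else
  if PySem.Str.isIn "[TIMEOUT FILTER]" msg_upper then "request_filtering"
  else
  if PySem.Str.isIn "[CLEANUP]" msg_upper then "cleanup_operations"
  else
  if PySem.Str.isIn "[ERROR]" msg_upper then "error_handling"
  else
  if PySem.Str.isIn "[ALL REQUESTS]" msg_upper || PySem.Str.isIn "[DEBUG]" msg_upper then "request_processing"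
  else
  if PySem.Str.isIn "[CLINE]" msg_upper then "cline_integration"
  else
  if PySem.Str.isIn "[SESSION]" msg_upper then "session_management"
  else
  if PySem.Str.isIn "[STREAMING DEBUG]" msg_upper || PySem.Str.isIn "[PROXY STREAMING DEBUG]" msg_upper then "streaming_responses"
  else
  if PySem.Str.isIn "[NON-STREAMING DEBUG]" msg_upper || PySem.Str.isIn "[PROXY DECOMPRESSION DEBUG]" msg_upper then "response_decompression"
  else
  if PySem.Str.isIn "TOKEN CALCULATION" msg_upper then "token_calculations"
  else
  if PySem.Str.isIn "[CONVERSATION DETECTION]" msg_upper then "conversation_detection"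
  else
  if PySem.Str.isIn "[KV DEBUG]" msg_upper || PySem.Str.isIn "[KV CACHE]" msg_upper then "kv_cache_optimization"
  else
  if PySem.Str.isIn "[CONVERSATION COMPRESS]" msg_upper then "conversation_compression"
  else
  if PySem.Str.isIn "[PROXY]" msg_upper then "compression_proxy"
  else
  if PySem.Str.isIn "SET MODEL CONTEXT" msg_upper then "model_context"
  else
  if PySem.Str.isIn "SERVER" msg_upper || PySem.Str.isIn "FORWARDED" msg_upper || PySem.Str.isIn "TARGET" msg_upper || PySem.Str.isIn "API" msg_upper then "server_communication"
  else
  if PySem.Str.isIn "[PAYLOAD DEBUG]" msg_upper then "payload_debugging"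
  else
  if PySem.Str.isIn "TEST" msg_upper || PySem.Str.isIn "DEMO" msg_upper || PySem.Str.isIn "EXPERIMENT" msg_upper then "test_utilities"
  else
  if PySem.Str.isIn "OVERRIDE" msg_upper || PySem.Str.isIn "TIMEOUT" msg_upper then "system_fixes"
  else
  if PySem.Str.isIn "COMPRESSION" msg_upper || PySem.Str.isIn "DYNAMIC DICTIONARY" msg_upper || PySem.Str.isIn "ANALYSIS" msg_upper then "compression_core"
  else
  if PySem.Str.isIn "SYMBOL" msg_upper || PySem.Str.isIn "MODEL CONTEXT" msg_upper then "symbol_management"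
  else
  "request_processing"

-- ===== PORT B =====
-- Source B's _CATEGORIES table (category of each priority; last entry = default)
def pvCategories : List String :=
  ["system_fixes", "request_filtering", "cleanup_operations", "error_handling",
   "request_processing", "cline_integration", "session_management",
   "streaming_responses", "response_decompression", "token_calculations",
   "conversation_detection", "kv_cache_optimization", "conversation_compression",
   "compression_proxy", "model_context", "server_communication",
   "payload_debugging", "test_utilities", "system_fixes", "compression_core",
   "symbol_management", "request_processing"]

-- Source B's _PATTERNS table: (pattern, priority) pairs
def pvPatterns : List (String × Nat) :=
  [("[FIX]", 0),
   ("[TIMEOUT FILTER]", 1),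
   ("[CLEANUP]", 2),
   ("[ERROR]", 3),
   ("[ALL REQUESTS]", 4), ("[DEBUG]", 4),
   ("[CLINE]", 5),
   ("[SESSION]", 6),
   ("[STREAMING DEBUG]", 7), ("[PROXY STREAMING DEBUG]", 7),
   ("[NON-STREAMING DEBUG]", 8), ("[PROXY DECOMPRESSION DEBUG]", 8),
   ("TOKEN CALCULATION", 9),
   ("[CONVERSATION DETECTION]", 10),
   ("[KV DEBUG]", 11), ("[KV CACHE]", 11),
   ("[CONVERSATION COMPRESS]", 12),
   ("[PROXY]", 13),
   ("SET MODEL CONTEXT", 14),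
   ("SERVER", 15), ("FORWARDED", 15), ("TARGET", 15), ("API", 15),
   ("[PAYLOAD DEBUG]", 16),
   ("TEST", 17), ("DEMO", 17), ("EXPERIMENT", 17),
   ("OVERRIDE", 18), ("TIMEOUT", 18),
   ("COMPRESSION", 19), ("DYNAMIC DICTIONARY", 19), ("ANALYSIS", 19),
   ("SYMBOL", 20), ("MODEL CONTEXT", 20)]

-- Source B's scan: u = message.upper(); for i in range(len(u)): for p, pr in _PATTERNS:
--   if pr < best and u.startswith(p, i): best = pr;  finally _CATEGORIES[best].
-- range(len(u)) is List.range u.length; u.startswith(p, i) with 0 ≤ i is exactly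
-- "p is a prefix of u[i:]" = PySem.Chars.startswith (u.drop i) p (working on code points);
-- best ≤ len(_CATEGORIES)-1 always holds (the fold never increases best), so the final
-- indexing _CATEGORIES[best] never raises and List.getD is exact.
def extract_debug_category_from_message_py_alt (message : String) : String :=
  let u := (PySem.Str.upper message).toList
  let best := (List.range u.length).foldl
    (fun b i => pvPatterns.foldl
      (fun b pp => if pp.2 < b && PySem.Chars.startswith (u.drop i) pp.1.toList then pp.2 else b) b)
    (pvCategories.length - 1)
  pvCategories.getD best "request_processing"

-- ===== PRECONDITION & SPEC =====
def Spec_extract_debug_category_from_message_py (message : String) (out : String) : Prop := out = extract_debug_category_from_message_py_alt message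
instance (message : String) (out : String) : Decidable (Spec_extract_debug_category_from_message_py message out) := by unfold Spec_extract_debug_category_from_message_py; infer_instance

-- ===== CLAIM (what is proved, stated in full; the proofs are below) =====
def Claim_equal_extract_debug_category_from_message_py : Prop := ∀ (message : String), Dom_extract_debug_category_from_message_py message → Spec_extract_debug_category_from_message_py message (extract_debug_category_from_message_py message)

-- ===== LEMMAS AND PROOFS =====

-- A's if-chain as a recursion over a rule list (proof-side normal form of A)
def pvHit (s : List Char) (ps : List String) : Bool := ps.any (fun p => PySem.Chars.isIn p.toList s)

def pvRules : List (List String × String) :=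
  [(["[FIX]"], "system_fixes"),
   (["[TIMEOUT FILTER]"], "request_filtering"),
   (["[CLEANUP]"], "cleanup_operations"),
   (["[ERROR]"], "error_handling"),
   (["[ALL REQUESTS]", "[DEBUG]"], "request_processing"),
   (["[CLINE]"], "cline_integration"),
   (["[SESSION]"], "session_management"),
   (["[STREAMING DEBUG]", "[PROXY STREAMING DEBUG]"], "streaming_responses"),
   (["[NON-STREAMING DEBUG]", "[PROXY DECOMPRESSION DEBUG]"], "response_decompression"),
   (["TOKEN CALCULATION"], "token_calculations"),
   (["[CONVERSATION DETECTION]"], "conversation_detection"),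
   (["[KV DEBUG]", "[KV CACHE]"], "kv_cache_optimization"),
   (["[CONVERSATION COMPRESS]"], "conversation_compression"),
   (["[PROXY]"], "compression_proxy"),
   (["SET MODEL CONTEXT"], "model_context"),
   (["SERVER", "FORWARDED", "TARGET", "API"], "server_communication"),
   (["[PAYLOAD DEBUG]"], "payload_debugging"),
   (["TEST", "DEMO", "EXPERIMENT"], "test_utilities"),
   (["OVERRIDE", "TIMEOUT"], "system_fixes"),
   (["COMPRESSION", "DYNAMIC DICTIONARY", "ANALYSIS"], "compression_core"),
   (["SYMBOL", "MODEL CONTEXT"], "symbol_management")]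

def pvChain (s : List Char) : List (List String × String) → String
  | [] => "request_processing"
  | (ps, c) :: R => if pvHit s ps then c else pvChain s R

lemma pvA_eq_chain (message : String) :
    extract_debug_category_from_message_py message
      = pvChain (PySem.Str.upper message).toList pvRules := by
  simp [extract_debug_category_from_message_py, pvChain, pvRules, pvHit, or_assoc]

lemma pvChain_eq_getD (s : List Char) (R : List (List String × String)) :
    pvChain s R = (R.map Prod.snd).getD (R.findIdx (fun rc => pvHit s rc.1)) "request_processing" := by
  induction R with
  | nil => simp [pvChain]
  | cons rc R ih =>
    obtain ⟨ps, c⟩ := rc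
    by_cases h : pvHit s ps <;> simp [pvChain, List.findIdx_cons, h, ih]

-- spec of the inner fold: it computes min(b0, matching priorities at this position)
lemma pvInner_spec (P : String → Bool) (l : List (String × Nat)) (b0 : Nat) :
    (l.foldl (fun b pp => if pp.2 < b && P pp.1 then pp.2 else b) b0) ≤ b0 ∧
    ((l.foldl (fun b pp => if pp.2 < b && P pp.1 then pp.2 else b) b0) = b0 ∨
      ∃ pp ∈ l, P pp.1 = true ∧ (l.foldl (fun b pp => if pp.2 < b && P pp.1 then pp.2 else b) b0) = pp.2) ∧
    ∀ pp ∈ l, P pp.1 = true → (l.foldl (fun b pp => if pp.2 < b && P pp.1 then pp.2 else b) b0) ≤ pp.2 := by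
  induction l generalizing b0 with
  | nil => simp
  | cons pp l ih =>
    simp only [List.foldl_cons]
    set b1 := if pp.2 < b0 && P pp.1 then pp.2 else b0 with hb1
    have hstep : b1 ≤ b0 ∧ (b1 = b0 ∨ (P pp.1 = true ∧ b1 = pp.2)) ∧ (P pp.1 = true → b1 ≤ pp.2) := by
      rw [hb1]
      by_cases hc : (pp.2 < b0 && P pp.1) = true
      · rw [if_pos hc]
        rw [Bool.and_eq_true, decide_eq_true_iff] at hc
        exact ⟨by omega, Or.inr ⟨hc.2, rfl⟩, fun _ => le_refl _⟩
      · rw [if_neg hc]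
        rw [Bool.and_eq_true, decide_eq_true_iff] at hc
        refine ⟨le_refl _, Or.inl rfl, fun hp => ?_⟩
        rcases Nat.lt_or_ge pp.2 b0 with h | h
        · exact absurd ⟨h, hp⟩ hc
        · omega
    obtain ⟨s1, s2, s3⟩ := hstep
    obtain ⟨h1, h2, h3⟩ := ih b1
    refine ⟨by omega, ?_, ?_⟩
    · rcases h2 with h2 | ⟨qq, hq, hqP, hqe⟩
      · rcases s2 with s2 | ⟨sP, se⟩
        · exact Or.inl (by omega)
        · exact Or.inr ⟨pp, by simp, sP, by omega⟩
      · exact Or.inr ⟨qq, by simp [hq], hqP, hqe⟩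
    · intro qq hq hqP
      rcases List.mem_cons.mp hq with rfl | hq
      · have := s3 hqP; omega
      · exact h3 qq hq hqP

-- spec of the outer fold over the positions
lemma pvOuter_spec (u : List Char) (xs : List Nat) (b0 : Nat) :
    (xs.foldl (fun b i => pvPatterns.foldl
        (fun b pp => if pp.2 < b && PySem.Chars.startswith (u.drop i) pp.1.toList then pp.2 else b) b) b0) ≤ b0 ∧
    ((xs.foldl (fun b i => pvPatterns.foldl
        (fun b pp => if pp.2 < b && PySem.Chars.startswith (u.drop i) pp.1.toList then pp.2 else b) b) b0) = b0 ∨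
      ∃ i ∈ xs, ∃ pp ∈ pvPatterns, PySem.Chars.startswith (u.drop i) pp.1.toList = true ∧
        (xs.foldl (fun b i => pvPatterns.foldl
          (fun b pp => if pp.2 < b && PySem.Chars.startswith (u.drop i) pp.1.toList then pp.2 else b) b) b0) = pp.2) ∧
    ∀ i ∈ xs, ∀ pp ∈ pvPatterns, PySem.Chars.startswith (u.drop i) pp.1.toList = true →
      (xs.foldl (fun b i => pvPatterns.foldl
        (fun b pp => if pp.2 < b && PySem.Chars.startswith (u.drop i) pp.1.toList then pp.2 else b) b) b0) ≤ pp.2 := by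
  induction xs generalizing b0 with
  | nil => simp
  | cons i xs ih =>
    simp only [List.foldl_cons]
    set b1 := pvPatterns.foldl
        (fun b pp => if pp.2 < b && PySem.Chars.startswith (u.drop i) pp.1.toList then pp.2 else b) b0 with hb1
    obtain ⟨g1, g2, g3⟩ := pvInner_spec (fun p => PySem.Chars.startswith (u.drop i) p.toList) pvPatterns b0
    obtain ⟨h1, h2, h3⟩ := ih b1
    refine ⟨by omega, ?_, ?_⟩
    · rcases h2 with h2 | ⟨j, hj, qq, hq, hqP, hqe⟩
      · rw [h2]
        rcases g2 with g2 | ⟨qq, hq, hqP, hqe⟩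
        · exact Or.inl g2
        · exact Or.inr ⟨i, by simp, qq, hq, hqP, hqe⟩
      · exact Or.inr ⟨j, by simp [hj], qq, hq, hqP, hqe⟩
    · intro j hj qq hq hqP
      rcases List.mem_cons.mp hj with rfl | hj
      · have := g3 qq hq hqP
        omega
      · exact h3 j hj qq hq hqP

-- a nonempty pattern starts at some position < length iff it is a substring
lemma pvPos_iff_isIn (u : List Char) (p : List Char) (hp : p ≠ []) :
    (∃ i ∈ List.range u.length, PySem.Chars.startswith (u.drop i) p = true) ↔
      PySem.Chars.isIn p u = true := by
  rw [← PySem.Chars.exists_prefix_drop_iff_isIn]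
  constructor
  · rintro ⟨i, _, hs⟩
    exact ⟨i, (PySem.Chars.startswith_iff _ _).mp hs⟩
  · rintro ⟨j, hj⟩
    by_cases hlt : j < u.length
    · exact ⟨j, List.mem_range.mpr hlt, (PySem.Chars.startswith_iff _ _).mpr hj⟩
    · exfalso
      rw [List.drop_eq_nil_of_le (by omega)] at hj
      exact hp (List.prefix_nil.mp hj)

-- flattened-table membership ↔ the rule of that priority hits
lemma pvFlat_iff (u : List Char) (pr : Nat) :
    (∃ pp ∈ pvPatterns, pp.2 = pr ∧ PySem.Chars.isIn pp.1.toList u = true) ↔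
      (pr < 21 ∧ pvHit u (pvRules.getD pr ([], "")).1 = true) := by
  constructor
  · rintro ⟨pp, hmem, hpr, hin⟩
    subst hpr
    fin_cases hmem <;> simp_all [pvHit, pvRules]
  · rintro ⟨hpr, hhit⟩
    interval_cases pr <;>
      · simp only [pvRules, pvHit, List.getD, List.any_eq_true] at hhit
        simp only [pvPatterns]
        simp at hhit ⊢
        tauto

lemma pvCats_lookup (b : Nat) (hb : b ≤ 21) :
    pvCategories.getD b "request_processing"
      = (pvRules.map Prod.snd).getD b "request_processing" := by
  interval_cases b <;> rfl

lemma pvFindIdx_le {α : Type} (l : List α) (p : α → Bool) (j : Nat) (hj : j < l.length) (h : p l[j] = true) : l.findIdx p ≤ j := by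
  by_contra hc
  have h2 := List.not_of_lt_findIdx (xs := l) (p := p) (i := j) (show j < l.findIdx p by omega)
  exact Bool.noConfusion (h.symm.trans h2)

lemma pvPats_facts : ∀ pp ∈ pvPatterns, pp.1.toList ≠ [] ∧ pp.2 ≤ 20 := by decide

-- ===== VERDICT (by name: the statement is the Claim_ definition above) =====
theorem extract_debug_category_from_message_py_spec : Claim_equal_extract_debug_category_from_message_py := by
  intro message _
  unfold Spec_extract_debug_category_from_message_py
  rw [pvA_eq_chain, pvChain_eq_getD]
  have halt : extract_debug_category_from_message_py_alt message
      = pvCategories.getD ((List.range (PySem.Str.upper message).toList.length).foldl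
          (fun b i => pvPatterns.foldl
            (fun b pp => if pp.2 < b && PySem.Chars.startswith ((PySem.Str.upper message).toList.drop i) pp.1.toList then pp.2 else b) b) 21)
          "request_processing" := rfl
  rw [halt]
  set s := (PySem.Str.upper message).toList with hs
  obtain ⟨o1, o2, o3⟩ := pvOuter_spec s (List.range s.length) 21
  set R := (List.range s.length).foldl
      (fun b i => pvPatterns.foldl
        (fun b pp => if pp.2 < b && PySem.Chars.startswith (s.drop i) pp.1.toList then pp.2 else b) b) 21 with hRdef
  set F := pvRules.findIdx (fun rc => pvHit s rc.1) with hFdef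
  have hFle : F ≤ 21 := by
    have := List.findIdx_le_length (xs := pvRules) (p := fun rc => pvHit s rc.1)
    rw [show pvRules.length = 21 from rfl] at this
    exact this
  have keyA : F < 21 → R ≤ F := by
    intro hF
    have hlen : F < pvRules.length := by rw [show pvRules.length = 21 from rfl]; exact hF
    have hg := List.findIdx_getElem (w := hlen)
    have hget : pvRules.getD F ([], "") = pvRules[F] := List.getD_eq_getElem _ _ hlen
    obtain ⟨pp, hp, hpr, hin⟩ := (pvFlat_iff s F).mpr ⟨hF, by rw [hget]; simpa using hg⟩
    obtain ⟨i, hi, hsw⟩ := (pvPos_iff_isIn s pp.1.toList (pvPats_facts pp hp).1).mpr hin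
    have := o3 i hi pp hp hsw
    omega
  have keyB : R ≠ 21 → F ≤ R ∧ R < 21 := by
    intro hne
    rcases o2 with h | ⟨i, hi, pp, hp, hsw, hRe⟩
    · exact absurd h hne
    · have hin := (pvPos_iff_isIn s pp.1.toList (pvPats_facts pp hp).1).mp ⟨i, hi, hsw⟩
      obtain ⟨h21, hhit⟩ := (pvFlat_iff s pp.2).mp ⟨pp, hp, rfl, hin⟩
      have hlen : pp.2 < pvRules.length := by rw [show pvRules.length = 21 from rfl]; exact h21
      have hget : pvRules.getD pp.2 ([], "") = pvRules[pp.2] := List.getD_eq_getElem _ _ hlen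
      have hF : F ≤ pp.2 := pvFindIdx_le pvRules _ pp.2 hlen (by rw [hget] at hhit; simpa using hhit)
      exact ⟨by omega, by omega⟩
  have hRF : R = F := by
    by_cases hF : F < 21
    · have h1 := keyA hF
      have h2 := keyB (by omega)
      omega
    · by_cases hR : R = 21
      · omega
      · have := keyB hR
        omega
  rw [pvCats_lookup R o1, hRF]
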